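-- pv_equiv track=rewrite | github.com/kodsnack/advent_of_code_2018 | estomagordo-python3/day_18a.py | solve
-- ===== SOURCE A (Python) =====
-- def get_neighbours(d, height, width, y, x):
--     neighbours = []
--
--     if y > 0:
--         neighbours.append(d[y - 1][x])
--         if x > 0:
--             neighbours.append(d[y - 1][x - 1])
--         if x < width - 1:
--             neighbours.append(d[y - 1][x + 1])
--     if y < height - 1:
--         neighbours.append(d[y + 1][x])
--         if x > 0:
--             neighbours.append(d[y + 1][x - 1])
--         if x < width - 1:
--             neighbours.append(d[y + 1][x + 1])
--     if x > 0:
--         neighbours.append(d[y][x - 1])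
--     if x < width - 1:
--         neighbours.append(d[y][x + 1])
--
--     return neighbours
--
-- def solve(d):
--     height = len(d)
--     width = len(d[0])
--
--     for _ in range(10):
--         new_area = []
--
--         for y, row in enumerate(d):
--             new_row = []
--             for x, c in enumerate(row):
--                 neighbours = get_neighbours(d, height, width, y, x)
--                 if c == '.':
--                     if sum(n == '|' for n in neighbours) > 2:
--                         new_row.append('|')
--                     else:
--                         new_row.append('.')
--                 if c == '|':
--                     if sum(n == '#' for n in neighbours) > 2:
--                         new_row.append('#')
--                     else:
--                         new_row.append('|')
--                 if c == '#':
--                     if sum(n == '#' for n in neighbours) > 0 and sum(n == '|' for n in neighbours) > 0: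
--                         new_row.append('#')
--                     else:
--                         new_row.append('.')
--             new_area.append(new_row)
--
--         d = new_area
--
--     return sum(sum(c == '#' for c in line) for line in d) * sum(sum(c == '|' for c in line) for line in d)
-- ===== SOURCE B (Python) =====
-- def box_sums(m, w):
--     # 3x3 box sums of an int grid via two staged passes of shifted-row additions
--     zrow = [0] * w
--     hs = [[a + b + c for a, b, c in zip([0] + row[:-1], row, row[1:] + [0])]
--           for row in m]
--     return [[a + b + c for a, b, c in zip(up, mid, dn)]
--             for up, mid, dn in zip([zrow] + hs[:-1], hs, hs[1:] + [zrow])]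
--
-- def solve(d):
--     width = len(d[0])
--     grid = d
--     for _ in range(10):
--         t = [[1 if c == '|' else 0 for c in row] for row in grid]
--         p = [[1 if c == '#' else 0 for c in row] for row in grid]
--         bt = box_sums(t, width)
--         bp = box_sums(p, width)
--         new = []
--         for y, row in enumerate(grid):
--             out = []
--             for x, c in enumerate(row):
--                 trees = bt[y][x] - t[y][x]
--                 pounds = bp[y][x] - p[y][x]
--                 if c == '.':
--                     out.append('|' if trees > 2 else '.')
--                 elif c == '|':
--                     out.append('#' if pounds > 2 else '|')
--                 else:
--                     out.append('#' if pounds > 0 and trees > 0 else '.')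
--             new.append(out)
--         grid = new
--     pounds = sum(row.count('#') for row in grid)
--     trees = sum(row.count('|') for row in grid)
--     return pounds * trees
-- ===== Notes on version B (the rewrite author's own statement) =====
-- stated objective: alternative
-- what changed: Replaces A's per-cell neighbour gathering (get_neighbours with 8 boundary-branched appends, re-run for every cell) by a grid-level convolution: indicator grids for '|' and '#', separable 3x3 box sums built from two staged passes of shifted-row additions (zip of left/centre/right shifts, then up/centre/down rows), and the rules applied to the precomputed count grids with the centre subtracted.
import Mathlib
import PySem

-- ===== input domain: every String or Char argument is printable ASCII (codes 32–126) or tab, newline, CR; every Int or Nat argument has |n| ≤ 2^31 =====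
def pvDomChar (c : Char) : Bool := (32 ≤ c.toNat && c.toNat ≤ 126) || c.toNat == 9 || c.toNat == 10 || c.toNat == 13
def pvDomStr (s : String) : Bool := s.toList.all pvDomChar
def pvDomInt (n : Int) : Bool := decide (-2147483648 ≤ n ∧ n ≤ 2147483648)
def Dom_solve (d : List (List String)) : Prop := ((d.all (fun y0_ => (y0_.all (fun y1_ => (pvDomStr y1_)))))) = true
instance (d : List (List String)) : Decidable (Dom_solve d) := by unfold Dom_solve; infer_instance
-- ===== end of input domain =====

-- B replaces A's per-cell neighbour gathering (8 boundary-branched appends per cell) by a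
-- grid-level convolution: indicator grids for '|' and '#', separable 3x3 box sums built from
-- two staged passes of shifted-row additions, then the rules read the precomputed count grids.

-- ===== PORT A =====
-- d[y][x] as both Pythons index it (in-range on every admitted input; default never observed)
def pvCell (g : List (List String)) (y x : Int) : String :=
  PySem.List.pyGetD (PySem.List.pyGetD g y []) x ""

def get_neighbours (d : List (List String)) (height width y x : Int) : List String :=
  let neighbours : List String := []
  let neighbours := if 0 < y then
      let nb := neighbours ++ [pvCell d (y - 1) x]
      let nb := if 0 < x then nb ++ [pvCell d (y - 1) (x - 1)] else nb
      let nb := if x < width - 1 then nb ++ [pvCell d (y - 1) (x + 1)] else nb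
      nb
    else neighbours
  let neighbours := if y < height - 1 then
      let nb := neighbours ++ [pvCell d (y + 1) x]
      let nb := if 0 < x then nb ++ [pvCell d (y + 1) (x - 1)] else nb
      let nb := if x < width - 1 then nb ++ [pvCell d (y + 1) (x + 1)] else nb
      nb
    else neighbours
  let neighbours := if 0 < x then neighbours ++ [pvCell d y (x - 1)] else neighbours
  let neighbours := if x < width - 1 then neighbours ++ [pvCell d y (x + 1)] else neighbours
  neighbours

-- one pass of A's outer 'for _ in range(10)' body
def solveStep (d : List (List String)) (height width : Int) : List (List String) :=
  (PySem.List.enumerate d 0).foldl (fun new_area yrow =>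
    new_area ++ [(PySem.List.enumerate yrow.2 0).foldl (fun new_row xc =>
      let neighbours := get_neighbours d height width yrow.1 xc.1
      let new_row := if xc.2 == "." then
          (if 2 < neighbours.countP (· == "|") then new_row ++ ["|"] else new_row ++ ["."])
        else new_row
      let new_row := if xc.2 == "|" then
          (if 2 < neighbours.countP (· == "#") then new_row ++ ["#"] else new_row ++ ["|"])
        else new_row
      let new_row := if xc.2 == "#" then
          (if 0 < neighbours.countP (· == "#") ∧ 0 < neighbours.countP (· == "|") then new_row ++ ["#"] else new_row ++ ["."])
        else new_row
      new_row) []]) []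

def solve (d : List (List String)) : Int :=
  let height := PySem.List.len d
  let width := PySem.List.len (PySem.List.pyGetD d 0 [])
  let final := (PySem.List.pyRange 0 10 1).foldl (fun g _ => solveStep g height width) d
  (↑((final.map (fun line => line.countP (· == "#"))).sum) : Int) *
    (↑((final.map (fun line => line.countP (· == "|"))).sum) : Int)

-- ===== PORT B =====
-- indicator row: [1 if c == t else 0 for c in row]
def indRow (t : String) (row : List String) : List Int :=
  row.map (fun c => if c == t then 1 else 0)

-- horizontal pass: [a+b+c for a,b,c in zip([0]+row[:-1], row, row[1:]+[0])]
def hRow (row : List Int) : List Int :=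
  List.zipWith (fun a b => a + b)
    (List.zipWith (fun a b => a + b) (0 :: row.dropLast) row)
    (row.drop 1 ++ [0])

def rowAdd (a b : List Int) : List Int := List.zipWith (fun u v => u + v) a b

-- vertical pass over the horizontally summed rows (zip with up/down shifted row lists)
def boxSums (m : List (List Int)) (w : Int) : List (List Int) :=
  let zrow := PySem.List.pyRepeat [(0 : Int)] w
  let hs := m.map hRow
  List.zipWith rowAdd (List.zipWith rowAdd (zrow :: hs.dropLast) hs) (hs.drop 1 ++ [zrow])

-- m[y][x] on an int grid (in-range on every admitted input; default never observed)
def pvCellI (m : List (List Int)) (y x : Int) : Int :=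
  PySem.List.pyGetD (PySem.List.pyGetD m y []) x 0

-- one pass of B's loop body: read the precomputed count grids, subtract the centre
def solveStepB (g : List (List String)) (w : Int) : List (List String) :=
  let t := g.map (indRow "|")
  let p := g.map (indRow "#")
  let bt := boxSums t w
  let bp := boxSums p w
  (PySem.List.enumerate g 0).foldl (fun new yrow =>
    new ++ [(PySem.List.enumerate yrow.2 0).foldl (fun out xc =>
      let trees := pvCellI bt yrow.1 xc.1 - pvCellI t yrow.1 xc.1
      let pounds := pvCellI bp yrow.1 xc.1 - pvCellI p yrow.1 xc.1
      if xc.2 == "." then out ++ [if 2 < trees then "|" else "."]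
      else if xc.2 == "|" then out ++ [if 2 < pounds then "#" else "|"]
      else out ++ [if 0 < pounds ∧ 0 < trees then "#" else "."]) []]) []

def solve_alt (d : List (List String)) : Int :=
  let w := PySem.List.len (PySem.List.pyGetD d 0 [])
  let grid := (PySem.List.pyRange 0 10 1).foldl (fun g _ => solveStepB g w) d
  (↑((grid.map (fun row => PySem.List.count row "#")).sum) : Int) *
    (↑((grid.map (fun row => PySem.List.count row "|")).sum) : Int)

-- ===== PRECONDITION & SPEC =====
-- Pre_ excludes exactly the inputs on which A raises IndexError: the empty grid, ragged grids,
-- and rectangular grids mixing cells from {'.','|','#'} with other strings — A silently drops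
-- unrecognized cells, reshaping the grid so a later step indexes past a shortened row.
def Pre_solve (d : List (List String)) : Prop :=
  d ≠ [] ∧ (∀ row ∈ d, row.length = (d.headD []).length) ∧
    ((∀ row ∈ d, ∀ c ∈ row, c = "." ∨ c = "|" ∨ c = "#") ∨
     (∀ row ∈ d, ∀ c ∈ row, c ≠ "." ∧ c ≠ "|" ∧ c ≠ "#"))
instance (d : List (List String)) : Decidable (Pre_solve d) := by unfold Pre_solve; infer_instance

def pvWitness_solve : List (List String) := [[".", "|"], ["#", "."]]

def Spec_solve (d : List (List String)) (out : Int) : Prop := out = solve_alt d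
instance (d : List (List String)) (out : Int) : Decidable (Spec_solve d out) := by unfold Spec_solve; infer_instance

-- ===== CLAIM (what is proved, stated in full; the proofs are below) =====
def Claim_equal_solve : Prop := ∀ (d : List (List String)), Dom_solve d → Pre_solve d → Spec_solve d (solve d)

-- ===== LEMMAS AND PROOFS =====

-- shared per-cell neighbour tally: 1 iff (yy,xx) is inside the h×w grid and holds t
def pvNb (g : List (List String)) (h w yy xx : Int) (t : String) : Nat :=
  if 0 ≤ yy ∧ yy < h ∧ 0 ≤ xx ∧ xx < w then (if pvCell g yy xx = t then 1 else 0) else 0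

def pvNbSum (g : List (List String)) (h w y x : Int) (t : String) : Nat :=
  pvNb g h w (y - 1) (x - 1) t + pvNb g h w (y - 1) x t + pvNb g h w (y - 1) (x + 1) t +
  pvNb g h w y (x - 1) t + pvNb g h w y (x + 1) t +
  pvNb g h w (y + 1) (x - 1) t + pvNb g h w (y + 1) x t + pvNb g h w (y + 1) (x + 1) t

def pvRule (c : String) (trees yards : Nat) : String :=
  if c = "." then (if 2 < trees then "|" else ".")
  else if c = "|" then (if 2 < yards then "#" else "|")
  else if 0 < yards ∧ 0 < trees then "#" else "."

def pvSpecStep (g : List (List String)) (h w : Int) : List (List String) :=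
  (PySem.List.pyRange 0 h 1).map (fun y =>
    (PySem.List.pyRange 0 w 1).map (fun x =>
      pvRule (pvCell g y x) (pvNbSum g h w y x "|") (pvNbSum g h w y x "#")))

-- shape-only rectangularity (used on the B side and for junk grids)
def pvRect' (g : List (List String)) (h w : Int) : Prop :=
  (g.length : Int) = h ∧ (∀ row ∈ g, (row.length : Int) = w)

def pvRect (g : List (List String)) (h w : Int) : Prop :=
  (g.length : Int) = h ∧ (∀ row ∈ g, (row.length : Int) = w) ∧
  (∀ row ∈ g, ∀ c ∈ row, c = "." ∨ c = "|" ∨ c = "#")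

theorem pvNb_guard (g : List (List String)) (h w yy xx yy' xx' : Int) (t : String)
    (cond : Prop) [Decidable cond] (hyy : yy = yy') (hxx : xx = xx')
    (hiff : cond ↔ (0 ≤ yy ∧ yy < h ∧ 0 ≤ xx ∧ xx < w)) :
    pvNb g h w yy xx t = if cond then (if pvCell g yy' xx' = t then 1 else 0) else 0 := by
  subst hyy; subst hxx
  unfold pvNb
  by_cases hc : cond
  · rw [if_pos (hiff.mp hc), if_pos hc]
  · rw [if_neg (fun k => hc (hiff.mpr k)), if_neg hc]

theorem countA_eq (g : List (List String)) (h w y x : Int) (t : String)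
    (hy : 0 ≤ y) (hy2 : y < h) (hx : 0 ≤ x) (hx2 : x < w) :
    (get_neighbours g h w y x).countP (· == t) = pvNbSum g h w y x t := by
  unfold pvNbSum
  rw [pvNb_guard g h w (y - 1) (x - 1) (y - 1) (x - 1) t (0 < y ∧ 0 < x) rfl rfl (by omega),
      pvNb_guard g h w (y - 1) x (y - 1) x t (0 < y) rfl rfl (by omega),
      pvNb_guard g h w (y - 1) (x + 1) (y - 1) (x + 1) t (0 < y ∧ x < w - 1) rfl rfl (by omega),
      pvNb_guard g h w y (x - 1) y (x - 1) t (0 < x) rfl rfl (by omega),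
      pvNb_guard g h w y (x + 1) y (x + 1) t (x < w - 1) rfl rfl (by omega),
      pvNb_guard g h w (y + 1) (x - 1) (y + 1) (x - 1) t (y < h - 1 ∧ 0 < x) rfl rfl (by omega),
      pvNb_guard g h w (y + 1) x (y + 1) x t (y < h - 1) rfl rfl (by omega),
      pvNb_guard g h w (y + 1) (x + 1) (y + 1) (x + 1) t (y < h - 1 ∧ x < w - 1) rfl rfl (by omega)]
  unfold get_neighbours
  by_cases h1 : 0 < y <;> by_cases h2 : y < h - 1 <;> by_cases h3 : 0 < x <;> by_cases h4 : x < w - 1 <;>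
    simp [h1, h2, h3, h4, List.countP_cons, beq_iff_eq] <;> omega

theorem bodyA_eq (d : List (List String)) (height width y : Int) (acc : List String)
    (xc : Int × String) (hc : xc.2 = "." ∨ xc.2 = "|" ∨ xc.2 = "#") :
    (if xc.2 == "#" then (if 0 < (get_neighbours d height width y xc.1).countP (· == "#") ∧ 0 < (get_neighbours d height width y xc.1).countP (· == "|") then (if xc.2 == "|" then (if 2 < (get_neighbours d height width y xc.1).countP (· == "#") then (if xc.2 == "." then (if 2 < (get_neighbours d height width y xc.1).countP (· == "|") then acc ++ ["|"] else acc ++ ["."]) else acc) ++ ["#"] else (if xc.2 == "." then (if 2 < (get_neighbours d height width y xc.1).countP (· == "|") then acc ++ ["|"] else acc ++ ["."]) else acc) ++ ["|"]) else (if xc.2 == "." then (if 2 < (get_neighbours d height width y xc.1).countP (· == "|") then acc ++ ["|"] else acc ++ ["."]) else acc)) ++ ["#"] else (if xc.2 == "|" then (if 2 < (get_neighbours d height width y xc.1).countP (· == "#") then (if xc.2 == "." then (if 2 < (get_neighbours d height width y xc.1).countP (· == "|") then acc ++ ["|"] else acc ++ ["."]) else acc) ++ ["#"] else (if xc.2 ==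 "." then (if 2 < (get_neighbours d height width y xc.1).countP (· == "|") then acc ++ ["|"] else acc ++ ["."]) else acc) ++ ["|"]) else (if xc.2 == "." then (if 2 < (get_neighbours d height width y xc.1).countP (· == "|") then acc ++ ["|"] else acc ++ ["."]) else acc)) ++ ["."]) else (if xc.2 == "|" then (if 2 < (get_neighbours d height width y xc.1).countP (· == "#") then (if xc.2 == "." then (if 2 < (get_neighbours d height width y xc.1).countP (· == "|") then acc ++ ["|"] else acc ++ ["."]) else acc) ++ ["#"] else (if xc.2 == "." then (if 2 < (get_neighbours d height width y xc.1).countP (· == "|") then acc ++ ["|"] else acc ++ ["."]) else acc) ++ ["|"]) else (if xc.2 == "." then (if 2 < (get_neighbours d height width y xc.1).countP (· == "|") then acc ++ ["|"] else acc ++ ["."]) else acc))) = acc ++ [pvRule xc.2 ((get_neighbours d height width y xc.1).countP (· == "|")) ((get_neighbours d height width y xc.1).countP (· == "#"))] := by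
  obtain ⟨x, c⟩ := xc
  rcases hc with rfl | rfl | rfl <;> simp [pvRule] <;> split_ifs <;> simp_all

theorem stepA_eq (g : List (List String)) (h w : Int) (hrect : pvRect g h w) :
    solveStep g h w = pvSpecStep g h w := by
  obtain ⟨hh, hrow, hcan⟩ := hrect
  unfold solveStep pvSpecStep
  rw [PySem.List.foldl_append_singleton_eq_map, List.nil_append]
  apply List.ext_getElem
  · simp [PySem.List.length_enumerate, PySem.List.length_pyRange_one]; omega
  · intro k hk1 hk2
    rw [List.getElem_map, List.getElem_map, PySem.List.getElem_enumerate,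
        PySem.List.getElem_pyRange_one]
    have hkh : (k : Int) < h := by
      simp [PySem.List.length_enumerate] at hk1; omega
    have hmemrow : g[k] ∈ g := List.getElem_mem _
    have hrl : ((g[k]).length : Int) = w := hrow _ hmemrow
    simp only
    refine Eq.trans (PySem.List.foldl_congr_mem' _ _ _ _
      (fun xc hxc acc => bodyA_eq g h w (0 + (k : Int)) acc xc (by
        obtain ⟨j, hj, rfl⟩ := (PySem.List.mem_enumerate_iff _ _ _).mp hxc
        exact hcan _ hmemrow _ (List.getElem_mem _)))) ?_
    rw [PySem.List.foldl_append_singleton_eq_map, List.nil_append]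
    rw [PySem.List.enumerate_eq_map_pyRange g[k] ""]
    rw [show PySem.List.len (g[k]) = w from by rw [PySem.List.len_eq, hrl]]
    rw [List.map_map]
    apply List.map_congr_left
    intro x hx
    have hxb := PySem.List.mem_pyRange_one.mp hx
    simp only [Function.comp]
    have hcell : PySem.List.pyGetD g (0 + (k : Int)) ([] : List String) = g[k] := by
      rw [PySem.List.pyGetD_eq_getElem _ _ (by omega) (by omega)]
      simp
    rw [countA_eq g h w _ x _ (by omega) (by omega) (by omega) (by omega),
        countA_eq g h w _ x _ (by omega) (by omega) (by omega) (by omega)]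
    unfold pvCell
    rw [hcell]

theorem spec_rect (g : List (List String)) (h w : Int) (hrect : pvRect g h w) :
    pvRect (pvSpecStep g h w) h w := by
  obtain ⟨hh, hrow, hcan⟩ := hrect
  refine ⟨?_, ?_, ?_⟩
  · simp [pvSpecStep, PySem.List.length_pyRange_one]; omega
  · intro row hr
    unfold pvSpecStep at hr
    obtain ⟨y, hy, rfl⟩ := List.mem_map.mp hr
    have hy' := PySem.List.mem_pyRange_one.mp hy
    have hne : g ≠ [] := by intro e; subst e; simp at hh; omega
    obtain ⟨r0, hr0⟩ := List.exists_mem_of_ne_nil g hne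
    have hw0 := hrow r0 hr0
    simp [PySem.List.length_pyRange_one]; omega
  · intro row hr c hc
    unfold pvSpecStep at hr
    obtain ⟨y, hy, rfl⟩ := List.mem_map.mp hr
    obtain ⟨x, hx, rfl⟩ := List.mem_map.mp hc
    unfold pvRule
    split_ifs <;> simp

-- ===== B side: the separable box sums compute the neighbour tallies =====

-- guarded int-list read: 0 outside the row
def zGet (r : List Int) (x : Int) : Int :=
  if 0 ≤ x ∧ x < (r.length : Int) then PySem.List.pyGetD r x 0 else 0

-- guarded row read: [] outside the grid
def zRow (m : List (List Int)) (y : Int) : List Int :=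
  if 0 ≤ y ∧ y < (m.length : Int) then PySem.List.pyGetD m y [] else []

def cellN (g : List (List String)) (h w yy xx : Int) (t : String) : Int :=
  (pvNb g h w yy xx t : Int)

theorem hRow_length (r : List Int) : (hRow r).length = r.length := by
  simp [hRow]; omega

theorem zGet_eq_getElem (r : List Int) (x : Int) (hx : 0 ≤ x) (hx2 : x < (r.length : Int)) :
    zGet r x = r[x.toNat]'(by omega) := by
  unfold zGet
  rw [if_pos ⟨hx, hx2⟩, PySem.List.pyGetD_eq_getElem _ _ hx hx2]

theorem zGet_out (r : List Int) (x : Int) (h : ¬(0 ≤ x ∧ x < (r.length : Int))) : zGet r x = 0 :=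
  if_neg h

theorem hRow_getElem (r : List Int) (x : Nat) (hx : x < r.length) :
    (hRow r)[x]'(by rw [hRow_length]; exact hx) =
      (if x = 0 then 0 else r[x - 1]'(by omega)) + r[x] +
      (if _h : x + 1 < r.length then r[x + 1] else 0) := by
  unfold hRow
  rw [List.getElem_zipWith, List.getElem_zipWith]
  congr 1
  · congr 1
    cases x with
    | zero => simp
    | succ k =>
      simp only [List.getElem_cons_succ, Nat.add_sub_cancel, if_neg (Nat.succ_ne_zero k)]
      rw [List.getElem_dropLast]
  · by_cases hlt : x + 1 < r.length
    · rw [dif_pos hlt]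
      rw [List.getElem_append_left (by simp; omega)]
      rw [List.getElem_drop]
      congr 1
      omega
    · rw [dif_neg hlt]
      rw [List.getElem_append_right (by simp; omega)]
      simp

theorem zGet_hRow (r : List Int) (x : Int) (hx : 0 ≤ x) (hx2 : x < (r.length : Int)) :
    zGet (hRow r) x = zGet r (x - 1) + zGet r x + zGet r (x + 1) := by
  rw [zGet_eq_getElem _ _ hx (by rw [hRow_length] at *; omega)]
  rw [hRow_getElem r x.toNat (by omega)]
  congr 1
  · congr 1
    · by_cases h0 : x = 0
      · rw [if_pos (show x.toNat = 0 by omega), zGet_out _ _ (by omega)]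
      · rw [if_neg (by omega), zGet_eq_getElem _ _ (by omega) (by omega)]
        congr 1
        omega
    · rw [zGet_eq_getElem _ _ hx hx2]
  · by_cases hlt : x.toNat + 1 < r.length
    · rw [dif_pos hlt, zGet_eq_getElem _ _ (by omega) (by omega)]
      congr 1
      omega
    · rw [dif_neg hlt, zGet_out _ _ (by omega)]

theorem zGet_rowAdd (a b : List Int) (x : Int) (hlen : b.length = a.length) :
    zGet (rowAdd a b) x = zGet a x + zGet b x := by
  by_cases hin : 0 ≤ x ∧ x < (a.length : Int)
  · have hlin : x < ((rowAdd a b).length : Int) := by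
      simp [rowAdd, hlen]; omega
    rw [zGet_eq_getElem _ _ hin.1 hlin,
        zGet_eq_getElem _ _ hin.1 hin.2,
        zGet_eq_getElem _ _ hin.1 (by omega)]
    simp [rowAdd]
  · rw [zGet_out _ _ (by simp [rowAdd, hlen]; omega),
        zGet_out _ _ hin, zGet_out _ _ (by omega)]
    norm_num

theorem zGet_zrow (w x : Int) :
    zGet (PySem.List.pyRepeat [(0 : Int)] w) x = 0 := by
  rw [PySem.List.pyRepeat_singleton]
  by_cases hin : 0 ≤ x ∧ x < ((List.replicate w.toNat (0 : Int)).length : Int)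
  · rw [zGet_eq_getElem _ _ hin.1 hin.2]
    exact List.getElem_replicate _
  · exact zGet_out _ _ hin

-- under the shape hypothesis, the indicator row read is the per-cell tally
theorem ind_cellN (g : List (List String)) (h w : Int)
    (hh : (g.length : Int) = h) (hrow : ∀ row ∈ g, (row.length : Int) = w)
    (t : String) (yy : Int) (hy : 0 ≤ yy) (hy2 : yy < h) (x' : Int) :
    zGet (indRow t (g[yy.toNat]'(by omega))) x' = cellN g h w yy x' t := by
  have hrl : ((g[yy.toNat]'(by omega)).length : Int) = w := hrow _ (List.getElem_mem _)
  have hil : (indRow t (g[yy.toNat]'(by omega))).length = (g[yy.toNat]'(by omega)).length := by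
    simp [indRow]
  by_cases hin : 0 ≤ x' ∧ x' < w
  · rw [zGet_eq_getElem _ _ hin.1 (by rw [hil]; omega)]
    unfold cellN pvNb
    rw [if_pos ⟨hy, hy2, hin.1, hin.2⟩]
    unfold pvCell
    rw [PySem.List.pyGetD_eq_getElem _ _ hy (by omega),
        PySem.List.pyGetD_eq_getElem _ _ hin.1 (by omega)]
    simp only [indRow, List.getElem_map, beq_iff_eq]
    split_ifs <;> simp
  · rw [zGet_out _ _ (by rw [hil]; omega)]
    unfold cellN pvNb
    rw [if_neg (by omega)]
    simp

-- the horizontally summed row yy, read at x: the three tallies of row yy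
theorem hs_triple (g : List (List String)) (h w : Int)
    (hh : (g.length : Int) = h) (hrow : ∀ row ∈ g, (row.length : Int) = w)
    (t : String) (yy x : Int) (hx : 0 ≤ x) (hx2 : x < w) :
    zGet (zRow ((g.map (indRow t)).map hRow) yy) x =
      cellN g h w yy (x - 1) t + cellN g h w yy x t + cellN g h w yy (x + 1) t := by
  by_cases hin : 0 ≤ yy ∧ yy < h
  · have hyl : yy < (((g.map (indRow t)).map hRow).length : Int) := by simp; omega
    have hzr : zRow ((g.map (indRow t)).map hRow) yy =
        hRow (indRow t (g[yy.toNat]'(by omega))) := by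
      unfold zRow
      rw [if_pos ⟨hin.1, hyl⟩, PySem.List.pyGetD_eq_getElem _ _ hin.1 hyl]
      simp
    rw [hzr]
    have hrl : ((g[yy.toNat]'(by omega)).length : Int) = w := hrow _ (List.getElem_mem _)
    have hil : ((indRow t (g[yy.toNat]'(by omega))).length : Int) = w := by simp [indRow]; omega
    rw [zGet_hRow _ x hx (by omega)]
    rw [ind_cellN g h w hh hrow t yy hin.1 hin.2 (x - 1),
        ind_cellN g h w hh hrow t yy hin.1 hin.2 x,
        ind_cellN g h w hh hrow t yy hin.1 hin.2 (x + 1)]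
  · have : zRow ((g.map (indRow t)).map hRow) yy = [] := by
      unfold zRow
      rw [if_neg (by simp; omega)]
    rw [this, zGet_out _ _ (by simp)]
    unfold cellN pvNb
    rw [if_neg (by omega), if_neg (by omega), if_neg (by omega)]
    simp

-- the box-sum read at (y,x) minus the centre is exactly the 8-neighbour tally
theorem conv_eq (g : List (List String)) (h w : Int)
    (hh : (g.length : Int) = h) (hrow : ∀ row ∈ g, (row.length : Int) = w)
    (t : String) (y x : Int) (hy : 0 ≤ y) (hy2 : y < h) (hx : 0 ≤ x) (hx2 : x < w) :
    pvCellI (boxSums (g.map (indRow t)) w) y x - pvCellI (g.map (indRow t)) y x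
      = ((pvNbSum g h w y x t : Nat) : Int) := by
  have hn : 0 < g.length := by omega
  set hs := (g.map (indRow t)).map hRow with hhs
  have hhsl : hs.length = g.length := by simp [hhs]
  have hsrow : ∀ k (hk : k < hs.length), (hs[k]'hk).length = w.toNat := by
    intro k hk
    have : hs[k]'hk = hRow (indRow t (g[k]'(by omega))) := by simp [hhs]
    rw [this, hRow_length]
    have := hrow _ (List.getElem_mem (l := g) (n := k) (by omega))
    simp [indRow]; omega
  have hzl : (PySem.List.pyRepeat [(0 : Int)] w).length = w.toNat := by
    rw [PySem.List.pyRepeat_singleton]; simp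
  have hyb : y.toNat < hs.length := by omega
  have hb1 : y.toNat < (PySem.List.pyRepeat [(0 : Int)] w :: hs.dropLast).length := by
    simp; omega
  have hb2 : y.toNat < (hs.drop 1 ++ [PySem.List.pyRepeat [(0 : Int)] w]).length := by
    simp; omega
  set U := (PySem.List.pyRepeat [(0 : Int)] w :: hs.dropLast)[y.toNat]'hb1 with hUdef
  set M := hs[y.toNat]'hyb with hMdef
  set D := (hs.drop 1 ++ [PySem.List.pyRepeat [(0 : Int)] w])[y.toNat]'hb2 with hDdef
  have l1 : U.length = w.toNat := by
    rw [hUdef]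
    rcases Nat.eq_zero_or_pos y.toNat with h0 | hpos
    · simp [h0]
    · obtain ⟨k, hk⟩ : ∃ k, y.toNat = k + 1 := ⟨y.toNat - 1, by omega⟩
      simp only [hk, List.getElem_cons_succ]
      rw [List.getElem_dropLast]
      exact hsrow _ _
  have l2 : M.length = w.toNat := hsrow _ _
  have l3 : D.length = w.toNat := by
    rw [hDdef]
    by_cases hlt : y.toNat + 1 < hs.length
    · rw [List.getElem_append_left (by simp; omega), List.getElem_drop]
      exact hsrow _ _
    · rw [List.getElem_append_right (by simp; omega)]
      simp
  have hboxlen : (List.zipWith rowAdd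
      (List.zipWith rowAdd (PySem.List.pyRepeat [(0 : Int)] w :: hs.dropLast) hs)
      (hs.drop 1 ++ [PySem.List.pyRepeat [(0 : Int)] w])).length = hs.length := by
    simp; omega
  have hboxrow : PySem.List.pyGetD (boxSums (g.map (indRow t)) w) y ([] : List Int) =
      rowAdd (rowAdd U M) D := by
    unfold boxSums
    rw [← hhs]
    rw [PySem.List.pyGetD_eq_getElem _ _ hy (by rw [hboxlen]; omega)]
    rw [List.getElem_zipWith, List.getElem_zipWith]
  have hrl4 : (rowAdd (rowAdd U M) D).length = w.toNat := by
    simp [rowAdd, l1, l2, l3]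
  have hbox : pvCellI (boxSums (g.map (indRow t)) w) y x = zGet (rowAdd (rowAdd U M) D) x := by
    unfold pvCellI
    rw [hboxrow]
    unfold zGet
    rw [if_pos ⟨hx, by rw [hrl4]; omega⟩]
  rw [hbox]
  rw [zGet_rowAdd _ _ _ (by simp [rowAdd, l1, l2, l3]),
      zGet_rowAdd _ _ _ (by rw [l2, l1])]
  have hUx : zGet U x = zGet (zRow hs (y - 1)) x := by
    rw [hUdef]
    rcases Nat.eq_zero_or_pos y.toNat with h0 | hpos
    · simp only [h0, List.getElem_cons_zero]
      rw [zGet_zrow]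
      have : zRow hs (y - 1) = [] := by
        unfold zRow; rw [if_neg (by omega)]
      rw [this, zGet_out _ _ (by simp)]
    · obtain ⟨k, hk⟩ : ∃ k, y.toNat = k + 1 := ⟨y.toNat - 1, by omega⟩
      simp only [hk, List.getElem_cons_succ]
      rw [List.getElem_dropLast]
      have : zRow hs (y - 1) = hs[k]'(by omega) := by
        unfold zRow
        rw [if_pos ⟨by omega, by omega⟩, PySem.List.pyGetD_eq_getElem _ _ (by omega) (by omega)]
        congr 1
        omega
      rw [this]
  have hMx : zGet M x = zGet (zRow hs y) x := by
    rw [hMdef]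
    have : zRow hs y = hs[y.toNat]'hyb := by
      unfold zRow
      rw [if_pos ⟨hy, by omega⟩, PySem.List.pyGetD_eq_getElem _ _ hy (by omega)]
    rw [this]
  have hDx : zGet D x = zGet (zRow hs (y + 1)) x := by
    rw [hDdef]
    by_cases hlt : y.toNat + 1 < hs.length
    · rw [List.getElem_append_left (by simp; omega), List.getElem_drop]
      have : zRow hs (y + 1) = hs[1 + y.toNat]'(by omega) := by
        unfold zRow
        rw [if_pos ⟨by omega, by omega⟩, PySem.List.pyGetD_eq_getElem _ _ (by omega) (by omega)]
        congr 1
        omega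
      rw [this]
    · rw [List.getElem_append_right (by simp; omega)]
      rw [List.getElem_singleton, zGet_zrow]
      have : zRow hs (y + 1) = [] := by
        unfold zRow; rw [if_neg (by omega)]
      rw [this, zGet_out _ _ (by simp)]
  rw [hUx, hMx, hDx]
  rw [show zRow hs (y - 1) = zRow ((g.map (indRow t)).map hRow) (y - 1) from by rw [hhs],
      show zRow hs y = zRow ((g.map (indRow t)).map hRow) y from by rw [hhs],
      show zRow hs (y + 1) = zRow ((g.map (indRow t)).map hRow) (y + 1) from by rw [hhs]]
  rw [hs_triple g h w hh hrow t (y - 1) x hx hx2,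
      hs_triple g h w hh hrow t y x hx hx2,
      hs_triple g h w hh hrow t (y + 1) x hx hx2]
  have hcentre : pvCellI (g.map (indRow t)) y x = cellN g h w y x t := by
    unfold pvCellI
    have hrl : ((g[y.toNat]'(by omega)).length : Int) = w := hrow _ (List.getElem_mem _)
    rw [PySem.List.pyGetD_eq_getElem _ _ hy (by simp; omega)]
    rw [show ((g.map (indRow t))[y.toNat]'(by simp; omega)) = indRow t (g[y.toNat]'(by omega)) from by simp]
    rw [show PySem.List.pyGetD (indRow t (g[y.toNat]'(by omega))) x 0 = zGet (indRow t (g[y.toNat]'(by omega))) x from by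
      unfold zGet
      rw [if_pos ⟨hx, by simp [indRow]; omega⟩]]
    exact ind_cellN g h w hh hrow t y hy hy2 x
  rw [hcentre]
  unfold pvNbSum
  push_cast
  unfold cellN
  ring

theorem bodyB_eq (g : List (List String)) (h w : Int)
    (hh : (g.length : Int) = h) (hrow : ∀ row ∈ g, (row.length : Int) = w)
    (y : Int) (hy : 0 ≤ y) (hy2 : y < h)
    (acc : List String) (xc : Int × String) (hx : 0 ≤ xc.1) (hx2 : xc.1 < w) :
    (if xc.2 == "." then
        acc ++ [if 2 < pvCellI (boxSums (g.map (indRow "|")) w) y xc.1 - pvCellI (g.map (indRow "|")) y xc.1 then "|" else "."]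
      else if xc.2 == "|" then
        acc ++ [if 2 < pvCellI (boxSums (g.map (indRow "#")) w) y xc.1 - pvCellI (g.map (indRow "#")) y xc.1 then "#" else "|"]
      else acc ++ [if 0 < pvCellI (boxSums (g.map (indRow "#")) w) y xc.1 - pvCellI (g.map (indRow "#")) y xc.1 ∧ 0 < pvCellI (boxSums (g.map (indRow "|")) w) y xc.1 - pvCellI (g.map (indRow "|")) y xc.1 then "#" else "."]) =
    acc ++ [pvRule xc.2 (pvNbSum g h w y xc.1 "|") (pvNbSum g h w y xc.1 "#")] := by
  rw [conv_eq g h w hh hrow "|" y xc.1 hy hy2 hx hx2,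
      conv_eq g h w hh hrow "#" y xc.1 hy hy2 hx hx2]
  have e1 : (2 : Int) < ((pvNbSum g h w y xc.1 "|" : Nat) : Int) ↔ 2 < pvNbSum g h w y xc.1 "|" := by
    exact_mod_cast Iff.rfl
  have e2 : (2 : Int) < ((pvNbSum g h w y xc.1 "#" : Nat) : Int) ↔ 2 < pvNbSum g h w y xc.1 "#" := by
    exact_mod_cast Iff.rfl
  unfold pvRule
  by_cases h1 : xc.2 = "." <;> by_cases h2 : xc.2 = "|" <;>
    simp [h1, h2, e1, e2]

theorem stepB_eq (g : List (List String)) (h w : Int) (hrect : pvRect' g h w) :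
    solveStepB g w = pvSpecStep g h w := by
  obtain ⟨hh, hrow⟩ := hrect
  unfold solveStepB pvSpecStep
  rw [PySem.List.foldl_append_singleton_eq_map, List.nil_append]
  apply List.ext_getElem
  · simp [PySem.List.length_enumerate, PySem.List.length_pyRange_one]; omega
  · intro k hk1 hk2
    rw [List.getElem_map, List.getElem_map, PySem.List.getElem_enumerate,
        PySem.List.getElem_pyRange_one]
    have hkh : (k : Int) < h := by
      simp [PySem.List.length_enumerate] at hk1; omega
    have hmemrow : g[k] ∈ g := List.getElem_mem _
    have hrl : ((g[k]).length : Int) = w := hrow _ hmemrow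
    simp only
    refine Eq.trans (PySem.List.foldl_congr_mem' _ _ _ _
      (fun xc hxc acc => bodyB_eq g h w hh hrow (0 + (k : Int)) (by omega) (by omega) acc xc
        (by obtain ⟨j, hj, rfl⟩ := (PySem.List.mem_enumerate_iff _ _ _).mp hxc; simp)
        (by obtain ⟨j, hj, rfl⟩ := (PySem.List.mem_enumerate_iff _ _ _).mp hxc; simp; omega))) ?_
    rw [PySem.List.foldl_append_singleton_eq_map, List.nil_append]
    rw [PySem.List.enumerate_eq_map_pyRange g[k] ""]
    rw [show PySem.List.len (g[k]) = w from by rw [PySem.List.len_eq, hrl]]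
    rw [List.map_map]
    apply List.map_congr_left
    intro x hx
    simp only [Function.comp]
    have hcell : PySem.List.pyGetD g (0 + (k : Int)) ([] : List String) = g[k] := by
      rw [PySem.List.pyGetD_eq_getElem _ _ (by omega) (by omega)]
      simp
    unfold pvCell
    rw [hcell]

-- ===== junk branch: grids with no canonical cell =====

theorem pyGetD_eq_or_mem {α : Type} (l : List α) (i : Int) (d : α) :
    PySem.List.pyGetD l i d = d ∨ PySem.List.pyGetD l i d ∈ l := by
  by_cases hr : PySem.Raise.InRange l.length i
  · exact Or.inr (PySem.List.pyGetD_mem l d hr)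
  · exact Or.inl (PySem.List.pyGetD_of_none l i d ((PySem.List.pyGet?_eq_none_iff l i).mpr hr))

theorem pvCell_prop (G : List (List String)) (yy xx : Int) (P : String → Prop)
    (hempty : P "") (hall : ∀ row ∈ G, ∀ c ∈ row, P c) : P (pvCell G yy xx) := by
  unfold pvCell
  rcases pyGetD_eq_or_mem G yy [] with he | hm
  · rw [he]
    rcases pyGetD_eq_or_mem ([] : List String) xx "" with he2 | hm2
    · rw [he2]; exact hempty
    · simp at hm2
  · rcases pyGetD_eq_or_mem (PySem.List.pyGetD G yy []) xx "" with he2 | hm2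
    · rw [he2]; exact hempty
    · exact hall _ hm _ hm2

theorem bodyA_junk (d : List (List String)) (height width y : Int) (acc : List String)
    (xc : Int × String) (hc : xc.2 ≠ "." ∧ xc.2 ≠ "|" ∧ xc.2 ≠ "#") :
    (if xc.2 == "#" then (if 0 < (get_neighbours d height width y xc.1).countP (· == "#") ∧ 0 < (get_neighbours d height width y xc.1).countP (· == "|") then (if xc.2 == "|" then (if 2 < (get_neighbours d height width y xc.1).countP (· == "#") then (if xc.2 == "." then (if 2 < (get_neighbours d height width y xc.1).countP (· == "|") then acc ++ ["|"] else acc ++ ["."]) else acc) ++ ["#"] else (if xc.2 == "." then (if 2 < (get_neighbours d height width y xc.1).countP (· == "|") then acc ++ ["|"] else acc ++ ["."]) else acc) ++ ["|"]) else (if xc.2 == "." then (if 2 < (get_neighbours d height width y xc.1).countP (· == "|") then acc ++ ["|"] else acc ++ ["."]) else acc)) ++ ["#"] else (if xc.2 == "|" then (if 2 < (get_neighbours d height width y xc.1).countP (· == "#") then (if xc.2 == "." then (if 2 < (get_neighbours d height width y xc.1).countP (· == "|") then acc ++ ["|"] else acc ++ ["."]) else acc) ++ ["#"] else (if xc.2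 == "." then (if 2 < (get_neighbours d height width y xc.1).countP (· == "|") then acc ++ ["|"] else acc ++ ["."]) else acc) ++ ["|"]) else (if xc.2 == "." then (if 2 < (get_neighbours d height width y xc.1).countP (· == "|") then acc ++ ["|"] else acc ++ ["."]) else acc)) ++ ["."]) else (if xc.2 == "|" then (if 2 < (get_neighbours d height width y xc.1).countP (· == "#") then (if xc.2 == "." then (if 2 < (get_neighbours d height width y xc.1).countP (· == "|") then acc ++ ["|"] else acc ++ ["."]) else acc) ++ ["#"] else (if xc.2 == "." then (if 2 < (get_neighbours d height width y xc.1).countP (· == "|") then acc ++ ["|"] else acc ++ ["."]) else acc) ++ ["|"]) else (if xc.2 == "." then (if 2 < (get_neighbours d height width y xc.1).countP (· == "|") then acc ++ ["|"] else acc ++ ["."]) else acc))) = acc := by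
  simp [hc.1, hc.2.1, hc.2.2]

theorem stepA_junk (g : List (List String)) (h w : Int)
    (hj : ∀ row ∈ g, ∀ c ∈ row, c ≠ "." ∧ c ≠ "|" ∧ c ≠ "#") :
    ∀ row ∈ solveStep g h w, row = [] := by
  unfold solveStep
  rw [PySem.List.foldl_append_singleton_eq_map, List.nil_append]
  intro row hr
  obtain ⟨yrow, hyr, rfl⟩ := List.mem_map.mp hr
  obtain ⟨jj, hjj, rfl⟩ := (PySem.List.mem_enumerate_iff _ _ _).mp hyr
  refine Eq.trans (PySem.List.foldl_congr_mem' _ _ (fun acc _ => acc) _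
    (fun xc hxc acc => bodyA_junk g h w _ acc xc (by
      obtain ⟨i, hi, rfl⟩ := (PySem.List.mem_enumerate_iff _ _ _).mp hxc
      exact hj _ (List.getElem_mem _) _ (List.getElem_mem _)))) (PySem.List.foldl_ignore _ _)

theorem stepA_junk_inv (g : List (List String)) (h w : Int)
    (hj : ∀ row ∈ g, ∀ c ∈ row, c ≠ "." ∧ c ≠ "|" ∧ c ≠ "#") :
    ∀ row ∈ solveStep g h w, ∀ c ∈ row, c ≠ "." ∧ c ≠ "|" ∧ c ≠ "#" := by
  intro row hr c hc
  rw [stepA_junk g h w hj row hr] at hc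
  simp at hc

theorem foldA_junk (l : List Int) (g : List (List String)) (h w : Int)
    (hj : ∀ row ∈ g, ∀ c ∈ row, c ≠ "." ∧ c ≠ "|" ∧ c ≠ "#") :
    ∀ row ∈ l.foldl (fun g' _ => solveStep g' h w) g, ∀ c ∈ row, c ≠ "." ∧ c ≠ "|" ∧ c ≠ "#" := by
  induction l generalizing g with
  | nil => exact hj
  | cons a l ih => exact ih _ (stepA_junk_inv g h w hj)

theorem pvRule_dot (c : String) (hc : c ≠ "|") : pvRule c 0 0 = "." := by
  unfold pvRule
  split_ifs <;> first | rfl | omega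

theorem pvNbSum_zero (g : List (List String)) (h w y x : Int) (t : String) (ht : t ≠ "")
    (hj : ∀ row ∈ g, ∀ c ∈ row, c ≠ t) : pvNbSum g h w y x t = 0 := by
  have hnb : ∀ yy xx : Int, pvNb g h w yy xx t = 0 := by
    intro yy xx
    unfold pvNb
    split_ifs with h1 h2
    · exact absurd h2.symm (Ne.symm (pvCell_prop g yy xx (· ≠ t) (fun e => ht e.symm) hj))
    · rfl
    · rfl
  unfold pvNbSum
  simp [hnb]

theorem spec_junk (g : List (List String)) (h w : Int)
    (hj : ∀ row ∈ g, ∀ c ∈ row, c ≠ "|" ∧ c ≠ "#") :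
    ∀ row ∈ pvSpecStep g h w, ∀ c ∈ row, c ≠ "|" ∧ c ≠ "#" := by
  intro row hr c hc
  unfold pvSpecStep at hr
  obtain ⟨y, hy, rfl⟩ := List.mem_map.mp hr
  obtain ⟨x, hx, rfl⟩ := List.mem_map.mp hc
  rw [pvNbSum_zero g h w y x "|" (by decide) (fun row hr c hc => (hj row hr c hc).1),
      pvNbSum_zero g h w y x "#" (by decide) (fun row hr c hc => (hj row hr c hc).2)]
  rw [pvRule_dot _ (pvCell_prop g y x (· ≠ "|") (by decide) (fun row hr c hc => (hj row hr c hc).1))]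
  simp

theorem spec_shape (g : List (List String)) (h w : Int) (hh : 0 ≤ h) (hw : 0 ≤ w) :
    pvRect' (pvSpecStep g h w) h w := by
  constructor
  · simp [pvSpecStep, PySem.List.length_pyRange_one]; omega
  · intro row hr
    unfold pvSpecStep at hr
    obtain ⟨y, hy, rfl⟩ := List.mem_map.mp hr
    simp [PySem.List.length_pyRange_one]; omega

theorem foldB_junk (l : List Int) (g : List (List String)) (h w : Int)
    (hh0 : 0 ≤ h) (hw : 0 ≤ w) (hrect : pvRect' g h w)
    (hj : ∀ row ∈ g, ∀ c ∈ row, c ≠ "|" ∧ c ≠ "#") :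
    ∀ row ∈ l.foldl (fun g' _ => solveStepB g' w) g, ∀ c ∈ row, c ≠ "|" ∧ c ≠ "#" := by
  induction l generalizing g with
  | nil => exact hj
  | cons a l ih =>
    simp only [List.foldl_cons]
    rw [stepB_eq g h w hrect]
    exact ih _ (spec_shape g h w hh0 hw) (spec_junk g h w hj)

theorem iter_eq (l : List Int) (g : List (List String)) (h w : Int) (hrect : pvRect g h w) :
    l.foldl (fun g' _ => solveStep g' h w) g = l.foldl (fun g' _ => solveStepB g' w) g ∧
      pvRect (l.foldl (fun g' _ => solveStep g' h w) g) h w := by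
  induction l generalizing g with
  | nil => exact ⟨rfl, hrect⟩
  | cons a l ih =>
    have hA := stepA_eq g h w hrect
    have hAr : pvRect (solveStep g h w) h w := by rw [hA]; exact spec_rect g h w hrect
    have hB := stepB_eq g h w ⟨hrect.1, hrect.2.1⟩
    simp only [List.foldl_cons]
    rw [show solveStepB g w = solveStep g h w from by rw [hA, hB]]
    exact ih _ hAr

-- ===== VERDICT (by name: the statement is the Claim_ definition above) =====
theorem solve_spec : Claim_equal_solve := by
  intro d _ hpre
  obtain ⟨hne, hlen, hcase⟩ := hpre
  unfold Spec_solve solve solve_alt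
  simp only
  have hw0 : 0 ≤ PySem.List.len (PySem.List.pyGetD d 0 ([] : List String)) := by
    rw [PySem.List.len_eq]; exact Int.natCast_nonneg _
  have hhead : PySem.List.pyGetD d 0 ([] : List String) = d.headD [] := by
    cases d with
    | nil => simp [PySem.List.pyGetD_zero]
    | cons a t => rw [PySem.List.pyGetD_zero_cons]; rfl
  have hcount : ∀ (G : List (List String)) (v : String),
      (G.map (fun line => ((line.countP (fun x => x == v) : Nat) : Int))).sum =
        (((G.map (fun row => PySem.List.count row v)).sum : Nat) : Int) := by
    intro G v
    push_cast
    rw [List.map_map]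
    congr 1
  rcases hcase with hcan | hjunk
  · have hrect : pvRect d (PySem.List.len d)
        (PySem.List.len (PySem.List.pyGetD d 0 ([] : List String))) := by
      refine ⟨(PySem.List.len_eq d).symm, ?_, hcan⟩
      intro row hrw
      rw [PySem.List.len_eq, hhead]
      exact_mod_cast hlen row hrw
    obtain ⟨heq, _⟩ := iter_eq (PySem.List.pyRange 0 10 1) d _ _ hrect
    rw [heq, hcount, hcount]
  · have hh0 : 0 ≤ PySem.List.len d := by rw [PySem.List.len_eq]; exact Int.natCast_nonneg _
    have hrect' : pvRect' d (PySem.List.len d) (PySem.List.len (PySem.List.pyGetD d 0 ([] : List String))) := by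
      refine ⟨(PySem.List.len_eq d).symm, ?_⟩
      intro row hrw
      rw [PySem.List.len_eq, hhead]
      exact_mod_cast hlen row hrw
    have hjA := foldA_junk (PySem.List.pyRange 0 10 1) d (PySem.List.len d) (PySem.List.len (PySem.List.pyGetD d 0 [])) hjunk
    have hjB := foldB_junk (PySem.List.pyRange 0 10 1) d (PySem.List.len d) (PySem.List.len (PySem.List.pyGetD d 0 [])) hh0 hw0 hrect'
      (fun row hr c hc => ⟨(hjunk row hr c hc).2.1, (hjunk row hr c hc).2.2⟩)
    have hA0 : ∀ G : List (List String), (∀ row ∈ G, ∀ c ∈ row, c ≠ "#") →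
        (G.map (fun line => ((line.countP (fun x => x == "#") : Nat) : Int))).sum = 0 := by
      intro G hG
      refine List.sum_eq_zero ?_
      intro x hx
      obtain ⟨row, hrow, rfl⟩ := List.mem_map.mp hx
      have : row.countP (fun x => x == "#") = 0 :=
        List.countP_eq_zero.mpr (fun c hc => by simp [hG row hrow c hc])
      simp [this]
    have hB0 : ∀ G : List (List String), (∀ row ∈ G, ∀ c ∈ row, c ≠ "#") →
        (G.map (fun row => PySem.List.count row "#")).sum = 0 := by
      intro G hG
      refine List.sum_eq_zero ?_
      intro x hx
      obtain ⟨row, hrow, rfl⟩ := List.mem_map.mp hx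
      rw [PySem.List.count_eq]
      exact List.count_eq_zero.mpr (fun hmem => hG row hrow "#" hmem rfl)
    rw [hA0 _ (fun row hr c hc => (hjA row hr c hc).2.2),
        hB0 _ (fun row hr c hc => (hjB row hr c hc).2)]
    rw [Nat.cast_zero, zero_mul, zero_mul]
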